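-- pv_equiv track=rewrite | github.com/TheSkeward/fletcher | janissary.py | consume_channel_token
-- ===== SOURCE A (Python) =====
-- def consume_channel_token(args):
--     channel_name = ""
--     args_consumed = 0
--     for arg in args:
--         args_consumed += 1
--         channel_name += " " + arg
--         if (":" in channel_name) or "#" in channel_name:
--             break
--     args = args[args_consumed:]
--     channel_name = channel_name.lstrip()
--     return channel_name, args
-- ===== SOURCE B (Python) =====
-- def consume_channel_token(args):
--     consumed = next(
--         (i + 1 for i, arg in enumerate(args) if ":" in arg or "#" in arg),
--         len(args),
--     )
--     return " ".join(args[:consumed]).lstrip(), args[consumed:]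
-- ===== Notes on version B (the rewrite author's own statement) =====
-- stated objective: faster
-- what changed: Computes the number of consumed args first (index of the first arg containing ':' or '#', plus one, defaulting to len(args)), then builds the name with one ' '.join plus lstrip and slices the rest, instead of interleaving cumulative string concatenation with substring scans over the growing accumulator and an in-loop break.
import Mathlib
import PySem

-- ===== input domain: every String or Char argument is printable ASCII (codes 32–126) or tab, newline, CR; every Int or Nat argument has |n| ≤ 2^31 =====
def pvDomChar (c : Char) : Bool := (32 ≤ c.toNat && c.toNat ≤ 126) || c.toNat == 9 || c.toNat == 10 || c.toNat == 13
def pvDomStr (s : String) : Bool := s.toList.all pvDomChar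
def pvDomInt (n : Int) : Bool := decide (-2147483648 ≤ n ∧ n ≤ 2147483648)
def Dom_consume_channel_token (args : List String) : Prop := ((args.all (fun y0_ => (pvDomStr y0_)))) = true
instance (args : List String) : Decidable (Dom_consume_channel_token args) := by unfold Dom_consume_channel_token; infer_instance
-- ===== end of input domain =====

-- B separates delimiter detection (first arg containing ':' or '#') from name construction
-- (one join + lstrip) instead of interleaving accumulation with an in-loop break; objective: simpler.

-- ===== PORT A =====
-- the loop: channel_name accumulates " " + arg, args_consumed counts, break when ':' or '#' occurs
def consumeLoopA : List String → List Char → Nat → List Char × Nat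
  | [], acc, consumed => (acc, consumed)
  | a :: rest, acc, consumed =>
    let acc' := acc ++ ' ' :: a.toList
    if PySem.Chars.isIn [':'] acc' || PySem.Chars.isIn ['#'] acc' then (acc', consumed + 1)
    else consumeLoopA rest acc' (consumed + 1)

def consume_channel_token (args : List String) : String × List String :=
  let r := consumeLoopA args [] 0
  (String.ofList (PySem.Chars.lstrip r.1), PySem.List.slice args (some (r.2 : Int)) none)

-- ===== PORT B =====
def pvArgDelim (a : String) : Bool := PySem.Str.isIn ":" a || PySem.Str.isIn "#" a

def pvConsumed (args : List String) : Nat :=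
  (((args.findIdx? pvArgDelim).map (· + 1)).getD args.length)

def consume_channel_token_alt (args : List String) : String × List String :=
  let consumed := pvConsumed args
  (PySem.Str.lstrip (PySem.Str.join " " (args.take consumed)), args.drop consumed)

-- ===== PRECONDITION & SPEC =====
def Spec_consume_channel_token (args : List String) (out : String × List String) : Prop := out = consume_channel_token_alt args
instance (args : List String) (out : String × List String) : Decidable (Spec_consume_channel_token args out) := by unfold Spec_consume_channel_token; infer_instance

-- ===== CLAIM (what is proved, stated in full; the proofs are below) =====
def Claim_equal_consume_channel_token : Prop := ∀ (args : List String), Dom_consume_channel_token args → Spec_consume_channel_token args (consume_channel_token args)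

-- ===== LEMMAS AND PROOFS =====

lemma isIn_singleton (c : Char) (s : List Char) :
    PySem.Chars.isIn [c] s = decide (c ∈ s) := by
  rcases h : decide (c ∈ s) with _ | _
  · simp only [decide_eq_false_iff_not] at h
    rw [PySem.Chars.isIn_eq_false_iff]
    intro hinf
    exact h (hinf.mem (List.mem_singleton_self c))
  · simp only [decide_eq_true_eq] at h
    rw [PySem.Chars.isIn_iff_infix]
    obtain ⟨l, r, rfl⟩ := List.append_of_mem h
    exact ⟨l, r, by simp⟩

lemma delim_append (acc : List Char) (a : String)
    (h : (PySem.Chars.isIn [':'] acc || PySem.Chars.isIn ['#'] acc) = false) :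
    (PySem.Chars.isIn [':'] (acc ++ ' ' :: a.toList) || PySem.Chars.isIn ['#'] (acc ++ ' ' :: a.toList))
      = pvArgDelim a := by
  simp only [isIn_singleton, Bool.or_eq_false_iff, decide_eq_false_iff_not] at h
  simp only [pvArgDelim, PySem.Str.isIn, show (":" : String).toList = [':'] from rfl,
    show ("#" : String).toList = ['#'] from rfl, isIn_singleton]
  simp [h.1, h.2]

lemma pvConsumed_cons (a : String) (t : List String) :
    pvConsumed (a :: t) = if pvArgDelim a then 1 else pvConsumed t + 1 := by
  simp only [pvConsumed, List.findIdx?_cons]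
  rcases h : pvArgDelim a with _ | _
  · simp only [Bool.false_eq_true, if_false]
    rcases t.findIdx? pvArgDelim with _ | k <;> simp [List.length_cons]
  · simp

lemma consumeLoopA_spec (args : List String) (acc : List Char) (c : Nat)
    (h : (PySem.Chars.isIn [':'] acc || PySem.Chars.isIn ['#'] acc) = false) :
    consumeLoopA args acc c
      = (acc ++ (args.take (pvConsumed args)).flatMap (fun a => ' ' :: a.toList),
         c + pvConsumed args) := by
  induction args generalizing acc c with
  | nil => simp [consumeLoopA, pvConsumed]
  | cons a t ih =>
    rw [pvConsumed_cons]
    rcases ha : pvArgDelim a with _ | _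
    · simp only [consumeLoopA, delim_append acc a h, ha, Bool.false_eq_true, if_false]
      have hacc' : (PySem.Chars.isIn [':'] (acc ++ ' ' :: a.toList)
          || PySem.Chars.isIn ['#'] (acc ++ ' ' :: a.toList)) = false := by
        rw [delim_append acc a h]; exact ha
      rw [ih _ _ hacc']
      simp only [List.take_succ_cons, List.flatMap_cons, List.append_assoc, List.cons_append,
        Prod.mk.injEq, true_and]
      omega
    · simp [consumeLoopA, delim_append acc a h, ha]

lemma flatMap_sp (p : String) (t : List String) :
    (p :: t).flatMap (fun a => ' ' :: a.toList)
      = ' ' :: PySem.Chars.join [' '] ((p :: t).map String.toList) := by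
  induction t generalizing p with
  | nil => simp [PySem.Chars.join_singleton]
  | cons q t' ih =>
    simp only [List.flatMap_cons, List.map_cons, PySem.Chars.join_cons_cons]
    have := ih q
    simp only [List.flatMap_cons, List.map_cons] at this
    rw [this]
    simp

lemma lstrip_space (l : List Char) :
    PySem.Chars.lstrip (' ' :: l) = PySem.Chars.lstrip l := by
  simp [PySem.Chars.lstrip, List.dropWhile, show PySem.Chars.isspace ' ' = true from rfl]

-- ===== VERDICT (by name: the statement is the Claim_ definition above) =====
theorem consume_channel_token_spec : Claim_equal_consume_channel_token := by
  intro args _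
  show consume_channel_token args = consume_channel_token_alt args
  unfold consume_channel_token consume_channel_token_alt
  rw [consumeLoopA_spec args [] 0 (by decide)]
  simp only [List.nil_append, Nat.zero_add]
  rw [PySem.List.slice_from args (by positivity), Int.toNat_natCast]
  rcases htake : args.take (pvConsumed args) with _ | ⟨p, t⟩
  · simp [PySem.Str.lstrip, PySem.Str.join, PySem.Chars.join, PySem.Chars.lstrip, List.intercalate]
  · rw [flatMap_sp, lstrip_space]
    simp [PySem.Str.lstrip, PySem.Str.toList_join, show (" " : String).toList = [' '] from rfl]
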